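-- pv_equiv track=rewrite | github.com/samialabed/method-name-prediction | src/data/graph_feature_extractor.py | separate_method_name_from_body
-- ===== SOURCE A (Python) =====
-- from typing import List, Dict, Tuple
--
-- def separate_method_name_from_body(method_token: List[str]) -> Tuple[List[str], List[str]]:
--     method_name = []
--     for idx, token in enumerate(method_token):
--         # the method name is the first token that comes before '('
--         if idx + 1 < len(method_token) and 'lparen' in method_token[idx + 1]:
--             method_name = token
--         if 'lbrace' in token:
--             # the body is everything after open brace '{' up to the very end which is '}'
--             body = [item for sublist in method_token[idx + 1: len(method_token) - 1] for item in sublist]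
--
--             assert len(method_name) != 0, 'Method name should not be empty'
--             assert len(body) != 0, 'Method body should not be empty'
--
--             return method_name, body
--
--     raise Exception(
--         'Failed to separate the method name and body from the token.')  # Should I include the token used?
-- ===== SOURCE B (Python) =====
-- def separate_method_name_from_body(method_token):
--     # pass 1: first token containing 'lbrace'
--     brace_idx = None
--     for idx, token in enumerate(method_token):
--         if 'lbrace' in token:
--             brace_idx = idx
--             break
--     if brace_idx is None:
--         raise Exception(
--             'Failed to separate the method name and body from the token.')
--     # pass 2: the name is the token at the last qualifying index up to the brace
--     name_idx = max((i for i in range(brace_idx + 1)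
--                     if i + 1 < len(method_token) and 'lparen' in method_token[i + 1]),
--                    default=None)
--     method_name = method_token[name_idx] if name_idx is not None else []
--     # pass 3: the body is every character between the brace and the final token
--     body = [item for sublist in method_token[brace_idx + 1: len(method_token) - 1]
--             for item in sublist]
--     assert len(method_name) != 0, 'Method name should not be empty'
--     assert len(body) != 0, 'Method body should not be empty'
--     return method_name, body
-- ===== Notes on version B (the rewrite author's own statement) =====
-- stated objective: alternative
-- what changed: A's single interleaved loop (tracking the candidate name while scanning for the brace) is decomposed into three separate passes: find the first 'lbrace' token index, take the max qualifying name index up to it, and flatten the body slice.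
import Mathlib
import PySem

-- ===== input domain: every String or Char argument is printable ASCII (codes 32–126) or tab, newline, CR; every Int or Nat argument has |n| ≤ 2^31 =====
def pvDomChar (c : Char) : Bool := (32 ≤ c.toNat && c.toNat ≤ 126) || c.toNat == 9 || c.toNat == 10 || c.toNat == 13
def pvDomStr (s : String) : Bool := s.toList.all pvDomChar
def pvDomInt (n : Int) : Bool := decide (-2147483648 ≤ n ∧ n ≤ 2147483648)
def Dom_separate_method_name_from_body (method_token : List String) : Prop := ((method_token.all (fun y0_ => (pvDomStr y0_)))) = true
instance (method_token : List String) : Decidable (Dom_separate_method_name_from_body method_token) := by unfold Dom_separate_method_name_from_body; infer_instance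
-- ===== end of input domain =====

-- B replaces A's single interleaved loop by three separate passes (find first 'lbrace' index,
-- max qualifying name index up to it, flatten the body slice); objective: alternative decomposition.


-- ===== PORT A =====
-- shared with B: both Pythons contain the identical expressions
-- 'idx + 1 < len(method_token) and "lparen" in method_token[idx + 1]' and the body comprehension.
def pvParenNext (all : List String) (i : Nat) : Bool :=
  decide (i + 1 < all.length) && PySem.Str.isIn "lparen" (all.getD (i + 1) "")

-- iterating over a Python str yields its characters as 1-char strings
def pvStrChars (s : String) : List String := s.toList.map (fun c => String.ofList [c])

-- [item for sublist in method_token[i+1 : len(method_token)-1] for item in sublist]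
def pvBody (all : List String) (i : Nat) : List String :=
  (PySem.List.slice all (some ((i : Int) + 1)) (some (PySem.List.len all - 1))).flatMap pvStrChars

-- A's for-loop; none = the Python raises (no brace found, or an assert fails)
def pvALoop (all : List String) : List String → Nat → String → Option (String × List String)
  | [], _, _ => none
  | token :: rest, idx, name =>
    let name' := if pvParenNext all idx then token else name
    if PySem.Str.isIn "lbrace" token then
      let body := pvBody all idx
      if name' ≠ "" ∧ body ≠ [] then some (name', body) else none
    else pvALoop all rest (idx + 1) name'

def separate_method_name_from_body (method_token : List String) : String × List String :=
  (pvALoop method_token method_token 0 "").getD ("", [])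

-- ===== PORT B =====
def separate_method_name_from_body_alt (method_token : List String) : String × List String :=
  (match method_token.findIdx? (fun t => PySem.Str.isIn "lbrace" t) with
   | none => none
   | some b =>
     let nameIdx := ((List.range (b + 1)).filter (fun i => pvParenNext method_token i)).max?
     let name := match nameIdx with
                 | some i => method_token.getD i ""
                 | none => ""
     let body := pvBody method_token b
     if name ≠ "" ∧ body ≠ [] then some (name, body) else none).getD ("", [])

-- ===== PRECONDITION & SPEC =====
-- Pre_ = exactly the inputs on which Python A returns: some token contains 'lbrace', the name
-- picked up to (and including) the first such token is nonempty, and the body slice is nonempty;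
-- otherwise A raises (Exception / AssertionError).
def pvPre (method_token : List String) : Bool :=
  match method_token.findIdx? (fun t => PySem.Str.isIn "lbrace" t) with
  | none => false
  | some b =>
    (match ((List.range (b + 1)).filter (fun i => pvParenNext method_token i)).max? with
     | none => false
     | some i => method_token.getD i "" != "") && !(pvBody method_token b).isEmpty

def Pre_separate_method_name_from_body (method_token : List String) : Prop :=
  pvPre method_token = true
instance (method_token : List String) : Decidable (Pre_separate_method_name_from_body method_token) := by
  unfold Pre_separate_method_name_from_body; infer_instance

def pvWitness_separate_method_name_from_body : List String :=
  ["foo", "lparen", "lbrace", "x", "rbrace"]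

def Spec_separate_method_name_from_body (method_token : List String) (out : String × List String) : Prop := out = separate_method_name_from_body_alt method_token
instance (method_token : List String) (out : String × List String) : Decidable (Spec_separate_method_name_from_body method_token out) := by unfold Spec_separate_method_name_from_body; infer_instance

-- ===== CLAIM (what is proved, stated in full; the proofs are below) =====
def Claim_equal_separate_method_name_from_body : Prop := ∀ (method_token : List String), Dom_separate_method_name_from_body method_token → Pre_separate_method_name_from_body method_token → Spec_separate_method_name_from_body method_token (separate_method_name_from_body method_token)

-- ===== LEMMAS AND PROOFS =====

-- finishing step shared by both characterisations
def pvFinish (all : List String) (name : String) (b : Nat) : Option (String × List String) :=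
  if name ≠ "" ∧ pvBody all b ≠ [] then some (name, pvBody all b) else none

def pvUpd (all : List String) (nm : String) (i : Nat) : String :=
  if pvParenNext all i then all.getD i "" else nm

lemma pvMax?_append_singleton (xs : List Nat) (n : Nat) (h : ∀ x ∈ xs, x < n) :
    (xs ++ [n]).max? = some n := by
  induction xs with
  | nil => rfl
  | cons x xs ih =>
    rw [List.cons_append, List.max?_cons, ih (fun y hy => h y (by simp [hy]))]
    simp [Nat.max_eq_right (le_of_lt (h x (by simp)))]

lemma pvALoop_eq (all : List String) :
    ∀ (rest : List String) (k : Nat) (name : String), rest = all.drop k →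
      pvALoop all rest k name =
        match rest.findIdx? (fun t => PySem.Str.isIn "lbrace" t) with
        | none => none
        | some j =>
            pvFinish all (List.foldl (pvUpd all) name (List.range' k (j + 1))) (k + j) := by
  intro rest
  induction rest with
  | nil => intro k name _; simp [pvALoop, List.findIdx?_nil]
  | cons token rest ih =>
    intro k name h
    have h0 : all[k]? = some token := by
      have h2 : (List.drop k all)[0]? = some token := by rw [← h]; rfl
      simpa [List.getElem?_drop] using h2
    have h1 : rest = all.drop (k + 1) := by
      rw [← List.tail_drop, ← h]
      rfl
    by_cases hb : PySem.Str.isIn "lbrace" token = true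
    · have hsc : (token :: rest).findIdx? (fun t => PySem.Str.isIn "lbrace" t) = some 0 := by
        simp only [List.findIdx?_cons, hb]; rfl
      rw [hsc]
      show (if PySem.Str.isIn "lbrace" token = true then _ else _) = _
      rw [if_pos hb]
      have hr : List.range' k (0 + 1) = [k] := by simp
      simp [hr, pvFinish, pvUpd, List.getD, h0]
    · have hb' : PySem.Str.isIn "lbrace" token = false := by simpa using hb
      have hsc : (token :: rest).findIdx? (fun t => PySem.Str.isIn "lbrace" t)
          = (rest.findIdx? (fun t => PySem.Str.isIn "lbrace" t)).map (· + 1) := by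
        simp only [List.findIdx?_cons, hb']; rfl
      rw [hsc]
      show (if PySem.Str.isIn "lbrace" token = true then _ else _) = _
      rw [if_neg hb]
      rw [ih (k + 1) (if pvParenNext all k then token else name) h1]
      cases hj : rest.findIdx? (fun t => PySem.Str.isIn "lbrace" t) with
      | none => simp
      | some j =>
        simp only [Option.map_some]
        show _ = pvFinish all (List.foldl (pvUpd all) name (List.range' k (j + 1 + 1))) (k + (j + 1))
        have hgetD : all.getD k "" = token := by simp [List.getD, h0]
        have hupd : pvUpd all name k = if pvParenNext all k then token else name := by
          unfold pvUpd; rw [hgetD]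
        conv_rhs => rw [List.range'_succ, List.foldl_cons, hupd]
        rw [show k + (j + 1) = k + 1 + j by omega]

lemma pvFold_eq_max (all : List String) (n : Nat) :
    List.foldl (pvUpd all) "" (List.range n) =
      match ((List.range n).filter (fun i => pvParenNext all i)).max? with
      | some i => all.getD i ""
      | none => "" := by
  induction n with
  | zero => rfl
  | succ n ih =>
    rw [List.range_succ, List.foldl_append, List.filter_append]
    by_cases hc : pvParenNext all n = true
    · have hfil : List.filter (fun i => pvParenNext all i) [n] = [n] := by simp [hc]
      rw [hfil, pvMax?_append_singleton]
      · simp [pvUpd, hc]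
      · intro x hx
        have := List.mem_filter.1 hx
        simpa using List.mem_range.1 this.1
    · have hfil : List.filter (fun i => pvParenNext all i) [n] = [] := by simp [hc]
      rw [hfil, List.append_nil]
      simp only [List.foldl_cons, List.foldl_nil]
      rw [show pvUpd all (List.foldl (pvUpd all) "" (List.range n)) n
            = List.foldl (pvUpd all) "" (List.range n) by simp [pvUpd, hc]]
      exact ih

-- ===== VERDICT (by name: the statement is the Claim_ definition above) =====
theorem separate_method_name_from_body_spec : Claim_equal_separate_method_name_from_body := by
  intro mt _ _
  unfold Spec_separate_method_name_from_body
  unfold separate_method_name_from_body separate_method_name_from_body_alt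
  rw [pvALoop_eq mt mt 0 "" (by simp)]
  cases hb : mt.findIdx? (fun t => PySem.Str.isIn "lbrace" t) with
  | none => rfl
  | some b =>
    simp only [Nat.zero_add]
    rw [show List.range' 0 (b + 1) = List.range (b + 1) from List.range_eq_range'.symm]
    rw [pvFold_eq_max mt (b + 1)]
    rfl
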